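-- pv_equiv track=rewrite | github.com/ishsachdeva/articlescrape | app.py | looks_like_challenge
-- ===== SOURCE A (Python) =====
-- CHALLENGE_PHRASES = [
--     "Verifying you are human",
--     "Just a moment",
--     "Enable JavaScript and cookies to continue",
--     "Checking your browser before accessing",
--     "Checking if the site connection is secure",
--     "Access Denied",
--     "Please check back soon"
-- ]
--
-- def looks_like_challenge(html: str) -> bool:
--     if not html:
--         return False
--     low = html.lower()
--     for p in CHALLENGE_PHRASES:
--         if p.lower() in low:
--             return True
--     return False
-- ===== SOURCE B (Python) =====
-- CHALLENGE_PHRASES = [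
--     "Verifying you are human",
--     "Just a moment",
--     "Enable JavaScript and cookies to continue",
--     "Checking your browser before accessing",
--     "Checking if the site connection is secure",
--     "Access Denied",
--     "Please check back soon"
-- ]
--
-- _NEEDLES = tuple(p.lower() for p in CHALLENGE_PHRASES)
--
-- def looks_like_challenge(html: str) -> bool:
--     # one left-to-right scan: at each position, test all phrases at once
--     low = html.lower()
--     return any(low.startswith(_NEEDLES, i) for i in range(len(low)))
-- ===== Notes on version B (the rewrite author's own statement) =====
-- stated objective: alternative
-- what changed: Replaces seven independent whole-text substring scans (one `p.lower() in low` per phrase, with an early-return loop and an emptiness guard) by a single left-to-right scan of the lowered text that tests all pre-lowered phrases at once at each position via tuple-argument str.startswith; the empty-string guard disappears because the position range is then empty.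
import Mathlib
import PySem

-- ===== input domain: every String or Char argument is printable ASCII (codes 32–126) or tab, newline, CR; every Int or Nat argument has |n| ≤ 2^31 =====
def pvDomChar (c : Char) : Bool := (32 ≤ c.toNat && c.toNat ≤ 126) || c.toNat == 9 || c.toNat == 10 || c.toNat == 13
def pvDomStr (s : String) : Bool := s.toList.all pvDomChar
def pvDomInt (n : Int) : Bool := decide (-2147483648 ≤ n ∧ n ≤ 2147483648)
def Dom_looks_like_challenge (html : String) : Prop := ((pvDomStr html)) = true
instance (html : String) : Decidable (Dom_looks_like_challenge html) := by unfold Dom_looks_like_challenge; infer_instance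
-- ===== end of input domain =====

-- B replaces A's seven independent whole-text substring scans by one left-to-right scan of the
-- lowered text that tests all pre-lowered phrases at once at each position (objective: alternative).


-- ===== PORT A =====
def challengePhrases : List String := [
  "Verifying you are human",
  "Just a moment",
  "Enable JavaScript and cookies to continue",
  "Checking your browser before accessing",
  "Checking if the site connection is secure",
  "Access Denied",
  "Please check back soon"
]

def looks_like_challenge (html : String) : Bool :=
  if html = "" then false
  else
    let low := PySem.Str.lower html
    -- the for-loop with early 'return True' is List.any over the phrases
    challengePhrases.any (fun p => PySem.Str.isIn (PySem.Str.lower p) low)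

-- ===== PORT B =====
-- _NEEDLES = tuple(p.lower() for p in CHALLENGE_PHRASES)
def needles : List (List Char) := challengePhrases.map (fun p => PySem.Chars.lower p.toList)

def looks_like_challenge_alt (html : String) : Bool :=
  let low := PySem.Chars.lower html.toList
  -- range(len(low)) is List.range; low.startswith(tuple, i) = any needle is a prefix of low[i:]
  (List.range low.length).any (fun i =>
    needles.any (fun p => PySem.Chars.startswith (low.drop i) p))

-- ===== PRECONDITION & SPEC =====
def Spec_looks_like_challenge (html : String) (out : Bool) : Prop := out = looks_like_challenge_alt html
instance (html : String) (out : Bool) : Decidable (Spec_looks_like_challenge html out) := by unfold Spec_looks_like_challenge; infer_instance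

-- ===== CLAIM (what is proved, stated in full; the proofs are below) =====
def Claim_equal_looks_like_challenge : Prop := ∀ (html : String), Dom_looks_like_challenge html → Spec_looks_like_challenge html (looks_like_challenge html)

-- ===== LEMMAS AND PROOFS =====

-- a nonempty pattern occurs in s iff it starts at some position i < s.length
theorem isIn_eq_range_any (sub s : List Char) (h : sub ≠ []) :
    PySem.Chars.isIn sub s = (List.range s.length).any
      (fun i => PySem.Chars.startswith (s.drop i) sub) := by
  rw [Bool.eq_iff_iff]
  simp only [List.any_eq_true, List.mem_range, PySem.Chars.startswith_iff]
  rw [← PySem.Chars.exists_prefix_drop_iff_isIn]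
  constructor
  · rintro ⟨j, hj⟩
    by_cases hlt : j < s.length
    · exact ⟨j, hlt, hj⟩
    · exfalso
      rw [List.drop_eq_nil_of_le (le_of_not_gt hlt)] at hj
      exact h (List.prefix_nil.mp hj)
  · rintro ⟨i, _, hi⟩
    exact ⟨i, hi⟩

-- `any` is determined by the predicate's values on members
theorem any_congr_mem {α : Type} (l : List α) (f g : α → Bool)
    (h : ∀ a ∈ l, f a = g a) : l.any f = l.any g := by
  induction l with
  | nil => rfl
  | cons x xs ih => simp_all [List.any_cons]

-- swapping the two `any`s
theorem any_swap {α β : Type} (l : List α) (m : List β) (f : α → β → Bool) :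
    l.any (fun a => m.any (fun b => f a b)) = m.any (fun b => l.any (fun a => f a b)) := by
  rw [Bool.eq_iff_iff]
  simp only [List.any_eq_true]
  tauto

theorem phrases_lower_ne_nil : ∀ p ∈ challengePhrases, PySem.Chars.lower p.toList ≠ [] := by
  decide

-- ===== VERDICT (by name: the statement is the Claim_ definition above) =====
theorem looks_like_challenge_spec : Claim_equal_looks_like_challenge := by
  intro html _
  unfold Spec_looks_like_challenge looks_like_challenge looks_like_challenge_alt
  by_cases h : html = ""
  · subst h; decide
  · simp only [if_neg h]
    have hA : challengePhrases.any
        (fun p => PySem.Str.isIn (PySem.Str.lower p) (PySem.Str.lower html))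
        = challengePhrases.any
          (fun p => (List.range (PySem.Chars.lower html.toList).length).any
            (fun i => PySem.Chars.startswith ((PySem.Chars.lower html.toList).drop i)
              (PySem.Chars.lower p.toList))) := by
      apply any_congr_mem
      intro p hp
      simp only [PySem.Str.isIn_eq, PySem.Str.toList_lower]
      exact isIn_eq_range_any _ _ (phrases_lower_ne_nil p hp)
    rw [hA, any_swap]
    simp [needles, List.any_map, Function.comp_def]
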